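-- pv_equiv track=rewrite | github.com/limdongsun0814/Algorithm | 프로그래머스/2/60058. 괄호 변환/괄호 변환.py | tranfrom
-- ===== SOURCE A (Python) =====
-- def tranfrom(data):
--     u,v = "",""
--     r,l=0,0
--     case = False
--     for i in data:
--         if i == "(":
--             r+=1
--         elif i == ")":
--             l+=1
--         if case==False:
--             u+=i
--         else:
--             v+=i
--         if r==l:
--             case=True
--     return u,v
-- ===== SOURCE B (Python) =====
-- def tranfrom(data):
--     balance = 0
--     for idx, ch in enumerate(data):
--         if ch == "(":
--             balance += 1
--         elif ch == ")":
--             balance -= 1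
--         if balance == 0:
--             return data[:idx + 1], data[idx + 1:]
--     return data, ""
-- ===== Notes on version B (the rewrite author's own statement) =====
-- stated objective: simpler
-- what changed: Replaces A's two counts, latching boolean and two character-by-character string buffers with a single balance counter that finds the first zero-balance index and returns two slices of the input (measured faster: no per-char string concatenation).
import Mathlib
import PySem

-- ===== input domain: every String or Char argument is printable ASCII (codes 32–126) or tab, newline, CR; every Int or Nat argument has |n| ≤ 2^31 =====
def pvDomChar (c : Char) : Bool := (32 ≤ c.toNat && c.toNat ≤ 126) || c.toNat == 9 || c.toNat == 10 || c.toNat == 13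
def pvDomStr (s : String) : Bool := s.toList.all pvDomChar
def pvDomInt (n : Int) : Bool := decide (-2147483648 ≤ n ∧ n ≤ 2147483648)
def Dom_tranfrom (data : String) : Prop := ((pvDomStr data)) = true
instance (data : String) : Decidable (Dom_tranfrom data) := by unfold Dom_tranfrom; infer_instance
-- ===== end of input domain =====

-- B replaces A's two counters, latching flag and two character-by-character buffers by a
-- single balance counter that finds the split index and then slices (objective: simpler).

-- ===== PORT A =====
-- A's loop state: buffers u v, counts r l, latching flag `cse`; branches in source order.
def tranfromLoop : List Char → List Char → List Char → Int → Int → Bool → List Char × List Char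
  | [], u, v, _, _, _ => (u, v)
  | c :: rest, u, v, r, l, cse =>
    let r' := if c = '(' then r + 1 else r
    let l' := if c ≠ '(' ∧ c = ')' then l + 1 else l
    let u' := if cse = false then u ++ [c] else u
    let v' := if cse = false then v else v ++ [c]
    let cse' := if r' = l' then true else cse
    tranfromLoop rest u' v' r' l' cse'

def tranfrom (data : String) : String × String :=
  let p := tranfromLoop data.toList [] [] 0 0 false
  (String.ofList p.1, String.ofList p.2)

-- ===== PORT B =====
-- B's loop: enumerate with a balance counter; return the two slices at the first zero.
def tranfromAltLoop (data : String) : List (Int × Char) → Int → String × String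
  | [], _ => (data, "")
  | (idx, ch) :: rest, bal =>
    let bal' := if ch = '(' then bal + 1 else if ch = ')' then bal - 1 else bal
    if bal' = 0 then
      (PySem.Str.slice data none (some (idx + 1)), PySem.Str.slice data (some (idx + 1)) none)
    else tranfromAltLoop data rest bal'

def tranfrom_alt (data : String) : String × String :=
  tranfromAltLoop data (PySem.List.enumerate data.toList 0) 0

-- ===== PRECONDITION & SPEC =====
def Spec_tranfrom (data : String) (out : String × String) : Prop := out = tranfrom_alt data
instance (data : String) (out : String × String) : Decidable (Spec_tranfrom data out) := by unfold Spec_tranfrom; infer_instance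

-- ===== CLAIM (what is proved, stated in full; the proofs are below) =====
def Claim_equal_tranfrom : Prop := ∀ (data : String), Dom_tranfrom data → Spec_tranfrom data (tranfrom data)

-- ===== LEMMAS AND PROOFS =====

-- Once A's flag has latched, everything remaining is appended to v.
theorem tranfromLoop_true (t : List Char) : ∀ (u v : List Char) (r l : Int),
    tranfromLoop t u v r l true = (u, v ++ t) := by
  induction t with
  | nil => intro u v r l; simp [tranfromLoop]
  | cons c rest ih =>
    intro u v r l
    simp [tranfromLoop, ih]

-- Main invariant: while the flag is false, u is exactly the consumed prefix of `data`,
-- and B's balance equals r - l.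
theorem tranfromLoop_main (data : String) (t : List Char) : ∀ (u : List Char) (r l : Int),
    data.toList = u ++ t →
    (let p := tranfromLoop t u [] r l false; (String.ofList p.1, String.ofList p.2)) =
      tranfromAltLoop data (PySem.List.enumerate t (u.length : Int)) (r - l) := by
  induction t with
  | nil =>
    intro u r l hdata
    simp at hdata
    simp [tranfromLoop, PySem.List.enumerate, tranfromAltLoop, ← hdata]
  | cons c rest ih =>
    intro u r l hdata
    rw [PySem.List.enumerate_cons]
    by_cases hz : (if c = '(' then r + 1 else r) = (if c ≠ '(' ∧ c = ')' then l + 1 else l)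
    · -- the counts meet: A latches, B returns the slices here
      have hbal : (if c = '(' then (r - l) + 1 else if c = ')' then (r - l) - 1 else (r - l)) = 0 := by
        by_cases h1 : c = '(' <;> by_cases h2 : c = ')' <;> simp_all <;> omega
      simp only [tranfromLoop, hz, if_pos, tranfromAltLoop, hbal]
      rw [tranfromLoop_true]
      have hdata' : data.toList = (u ++ [c]) ++ rest := by simpa using hdata
      have e1 : (PySem.Str.slice data none (some ((u.length : Int) + 1))).toList = u ++ [c] := by
        simp only [PySem.Str.toList_slice, hdata', PySem.Chars.slice_eq_listSlice]
        rw [PySem.List.slice_to (u ++ [c] ++ rest) (by omega),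
          show ((u.length : Int) + 1).toNat = (u ++ [c]).length by simp, List.take_left]
      have e2 : (PySem.Str.slice data (some ((u.length : Int) + 1)) none).toList = rest := by
        simp only [PySem.Str.toList_slice, hdata', PySem.Chars.slice_eq_listSlice]
        rw [PySem.List.slice_from (u ++ [c] ++ rest) (by omega),
          show ((u.length : Int) + 1).toNat = (u ++ [c]).length by simp, List.drop_left]
      have e1' : PySem.Str.slice data none (some ((u.length : Int) + 1)) = String.ofList (u ++ [c]) := by
        rw [← e1, String.ofList_toList]
      have e2' : PySem.Str.slice data (some ((u.length : Int) + 1)) none = String.ofList rest := by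
        rw [← e2, String.ofList_toList]
      simp [e1', e2']
    · -- counts differ: both loops continue
      have hbal : ¬ (if c = '(' then (r - l) + 1 else if c = ')' then (r - l) - 1 else (r - l)) = 0 := by
        by_cases h1 : c = '(' <;> by_cases h2 : c = ')' <;> simp_all <;> omega
      simp only [tranfromLoop, hz, tranfromAltLoop, hbal]
      have hrec := ih (u ++ [c]) (if c = '(' then r + 1 else r) (if c ≠ '(' ∧ c = ')' then l + 1 else l)
        (by simpa using hdata)
      have hb' : (if c = '(' then r + 1 else r) - (if c ≠ '(' ∧ c = ')' then l + 1 else l) =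
          (if c = '(' then (r - l) + 1 else if c = ')' then (r - l) - 1 else (r - l)) := by
        by_cases h1 : c = '(' <;> by_cases h2 : c = ')' <;> simp_all <;> omega
      have hlen : ((u ++ [c]).length : Int) = (u.length : Int) + 1 := by simp
      rw [hb', hlen] at hrec
      simpa using hrec

-- ===== VERDICT (by name: the statement is the Claim_ definition above) =====
theorem tranfrom_spec : Claim_equal_tranfrom := by
  intro data _
  unfold Spec_tranfrom tranfrom tranfrom_alt
  have h := tranfromLoop_main data data.toList [] 0 0 (by simp)
  simpa using h
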